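-- pv_equiv track=rewrite | github.com/hyaticua/summarizer_bot | summarizer_bot/discord_tools.py | _format_batch_results
-- ===== SOURCE A (Python) =====
-- def _format_batch_results(results: list[tuple[bool, str]], action_verb: str) -> str:
--     """Format batch operation results into a summary string.
--
--     For a single item, returns the plain message (matching old single-item behavior).
--     For multiple items, returns a summary like "Reacted 4/5:\n  OK: ...\n  FAILED: ...".
--     """
--     if len(results) == 1:
--         return results[0][1]
--
--     ok = [msg for success, msg in results if success]
--     failed = [msg for success, msg in results if not success]
--     parts = [f"{action_verb} {len(ok)}/{len(results)}:"]
--     for msg in ok: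
--         parts.append(f"  OK: {msg}")
--     for msg in failed:
--         parts.append(f"  FAILED: {msg}")
--     return "\n".join(parts)
-- ===== SOURCE B (Python) =====
-- def _format_batch_results(results: list[tuple[bool, str]], action_verb: str) -> str:
--     if len(results) == 1:
--         return results[0][1]
--     ok_count = sum(1 for s, _ in results if s)
--     out = f"{action_verb} {ok_count}/{len(results)}:"
--     # stable sort puts successes first while preserving within-group order
--     for success, msg in sorted(results, key=lambda r: not r[0]):
--         out += "\n  OK: " + msg if success else "\n  FAILED: " + msg
--     return out
-- ===== Notes on version B (the rewrite author's own statement) =====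
-- stated objective: alternative
-- what changed: Replaces the two filtering comprehensions and list-of-parts join by a single count, one stable sort putting successes first, and one accumulation pass over the sorted sequence.
import Mathlib
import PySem

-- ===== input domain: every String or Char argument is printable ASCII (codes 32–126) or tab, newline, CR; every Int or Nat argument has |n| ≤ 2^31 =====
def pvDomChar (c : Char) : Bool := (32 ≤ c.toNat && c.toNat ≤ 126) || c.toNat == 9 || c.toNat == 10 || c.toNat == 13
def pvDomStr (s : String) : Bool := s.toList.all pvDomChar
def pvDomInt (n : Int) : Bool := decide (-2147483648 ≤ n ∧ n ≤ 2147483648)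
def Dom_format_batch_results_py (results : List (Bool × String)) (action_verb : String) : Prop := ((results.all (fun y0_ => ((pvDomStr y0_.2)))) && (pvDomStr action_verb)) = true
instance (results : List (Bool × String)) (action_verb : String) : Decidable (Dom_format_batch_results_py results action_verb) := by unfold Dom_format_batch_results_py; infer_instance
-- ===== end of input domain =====

-- ===== PORT A =====
-- A: early return for one item, then two filtering passes building a parts list joined by "\n".
def format_batch_results_py (results : List (Bool × String)) (action_verb : String) : String :=
  if results.length = 1 then
    ((PySem.List.pyGet? results 0).map (·.2)).getD ""  -- results[0][1]; in range since length = 1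
  else
    let ok := (results.filter (fun r => r.1)).map (·.2)
    let failed := (results.filter (fun r => !r.1)).map (·.2)
    let parts := [action_verb ++ " " ++ PySem.Int.toStr (Int.ofNat ok.length) ++ "/" ++ PySem.Int.toStr (Int.ofNat results.length) ++ ":"]
    let parts := parts ++ ok.map (fun msg => "  OK: " ++ msg)
    let parts := parts ++ failed.map (fun msg => "  FAILED: " ++ msg)
    PySem.Str.join "\n" parts

-- ===== PORT B =====
-- B: one success count, one stable sort putting successes first, one accumulation pass.
def format_batch_results_py_alt (results : List (Bool × String)) (action_verb : String) : String :=
  if results.length = 1 then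
    ((PySem.List.pyGet? results 0).map (·.2)).getD ""  -- results[0][1]; in range since length = 1
  else
    let okCount := results.foldl (fun (n : Int) r => if r.1 then n + 1 else n) 0
    let out := action_verb ++ " " ++ PySem.Int.toStr okCount ++ "/" ++ PySem.Int.toStr (Int.ofNat results.length) ++ ":"
    (PySem.List.sorted results (fun r => !r.1)).foldl
      (fun out r => out ++ (if r.1 then "\n  OK: " ++ r.2 else "\n  FAILED: " ++ r.2)) out

-- ===== PRECONDITION & SPEC =====
def Spec_format_batch_results_py (results : List (Bool × String)) (action_verb : String) (out : String) : Prop := out = format_batch_results_py_alt results action_verb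
instance (results : List (Bool × String)) (action_verb : String) (out : String) : Decidable (Spec_format_batch_results_py results action_verb out) := by unfold Spec_format_batch_results_py; infer_instance

-- ===== CLAIM (what is proved, stated in full; the proofs are below) =====
def Claim_equal_format_batch_results_py : Prop := ∀ (results : List (Bool × String)) (action_verb : String), Dom_format_batch_results_py results action_verb → Spec_format_batch_results_py results action_verb (format_batch_results_py results action_verb)

-- ===== LEMMAS AND PROOFS =====

-- insertBy walks past a prefix it never inserts into
theorem insertBy_append_skip {α : Type} (before : α → α → Bool) (x : α) (F rest : List α)
    (h : ∀ y ∈ F, before x y = false) :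
    PySem.List.insertBy before x (F ++ rest) = F ++ PySem.List.insertBy before x rest := by
  induction F with
  | nil => rfl
  | cons a F ih =>
    have ha : before x a = false := h a (by simp)
    simp [PySem.List.insertBy, ha, ih (fun y hy => h y (by simp [hy]))]

-- the stable sort by (not success) is exactly "successes first, failures after, each in order"
theorem foldl_insert_partition (xs F T : List (Bool × String))
    (hF : ∀ y ∈ F, y.1 = true) (hT : ∀ y ∈ T, y.1 = false) :
    xs.foldl (fun acc x => PySem.List.insertBy (fun a b => decide ((!a.1) < (!b.1))) x acc) (F ++ T)
      = (F ++ xs.filter (fun r => r.1)) ++ (T ++ xs.filter (fun r => !r.1)) := by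
  induction xs generalizing F T with
  | nil => simp
  | cons x xs ih =>
    by_cases hx : x.1 = true
    · have hskip : ∀ y ∈ F, (decide ((!x.1) < (!y.1))) = false := by
        intro y hy; simp [hx, hF y hy]
      have hins : PySem.List.insertBy (fun a b => decide ((!a.1) < (!b.1))) x (F ++ T)
          = F ++ (x :: T) := by
        rw [insertBy_append_skip _ _ _ _ hskip]
        cases T with
        | nil => rfl
        | cons t ts =>
          have ht : t.1 = false := hT t (by simp)
          simp [PySem.List.insertBy, hx, ht]
      have := ih (F ++ [x]) T (by intro y hy; rcases List.mem_append.1 hy with h | h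
                                  · exact hF y h
                                  · simp at h; simp [h, hx]) hT
      simp only [List.foldl_cons, hins]
      rw [show F ++ x :: T = (F ++ [x]) ++ T by simp, this]
      simp [hx]
    · have hx' : x.1 = false := by simpa using hx
      have hskip : ∀ y ∈ F ++ T, (decide ((!x.1) < (!y.1))) = false := by
        intro y hy; cases hb : y.1 <;> simp [hx']
      have hins : PySem.List.insertBy (fun a b => decide ((!a.1) < (!b.1))) x (F ++ T)
          = F ++ (T ++ [x]) := by
        rw [show F ++ T = (F ++ T) ++ [] by simp, insertBy_append_skip _ _ _ _ hskip]
        simp [PySem.List.insertBy]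
      have := ih F (T ++ [x]) hF (by intro y hy; rcases List.mem_append.1 hy with h | h
                                     · exact hT y h
                                     · simp at h; simp [h, hx'])
      simp only [List.foldl_cons, hins, this]
      simp [hx']

-- the stable sort by (not success) is exactly "successes first, failures after, each in order"
theorem sorted_bool_partition (xs : List (Bool × String)) :
    PySem.List.sorted xs (fun r => !r.1) =
      xs.filter (fun r => r.1) ++ xs.filter (fun r => !r.1) := by
  rw [PySem.List.sorted_eq_foldl_insertBy]
  simpa using foldl_insert_partition xs [] [] (by simp) (by simp)

-- counting successes with a fold is the length of the success filter
theorem okCount_eq (xs : List (Bool × String)) :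
    xs.foldl (fun (n : Int) r => if r.1 then n + 1 else n) 0 =
      Int.ofNat ((xs.filter (fun r => r.1)).length) := by
  suffices h : ∀ n : Int, xs.foldl (fun (n : Int) r => if r.1 then n + 1 else n) n =
      n + Int.ofNat ((xs.filter (fun r => r.1)).length) by simpa using h 0
  induction xs with
  | nil => simp
  | cons x xs ih =>
    intro n
    by_cases hx : x.1 = true
    · simp [hx, ih]
      omega
    · simp [hx, ih]

-- join with "\n" of head :: tail is a left fold of appends
theorem join_eq_foldl (h : String) (t : List String) :
    PySem.Str.join "\n" (h :: t) = t.foldl (fun acc s => acc ++ "\n" ++ s) h := by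
  induction t generalizing h with
  | nil => simp [PySem.Str.join, PySem.Chars.join_singleton]
  | cons a t ih =>
    rw [List.foldl_cons, ← ih (h ++ "\n" ++ a)]
    cases t with
    | nil => simp [PySem.Str.join, PySem.Chars.join_singleton, PySem.Chars.join_cons_cons]
    | cons b t' =>
      simp [PySem.Str.join, PySem.Chars.join_cons_cons, List.append_assoc]

theorem prefix_ok (m : String) : "\n" ++ ("  OK: " ++ m) = "\n  OK: " ++ m := by
  rw [← String.append_assoc]
  have h : ("\n" ++ "  OK: " : String) = "\n  OK: " := by decide
  rw [h]

theorem prefix_failed (m : String) : "\n" ++ ("  FAILED: " ++ m) = "\n  FAILED: " ++ m := by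
  rw [← String.append_assoc]
  have h : ("\n" ++ "  FAILED: " : String) = "\n  FAILED: " := by decide
  rw [h]

-- ===== VERDICT (by name: the statement is the Claim_ definition above) =====
theorem format_batch_results_py_spec : Claim_equal_format_batch_results_py := by
  intro results action_verb _
  unfold Spec_format_batch_results_py format_batch_results_py format_batch_results_py_alt
  by_cases h1 : results.length = 1
  · simp [h1]
  · simp only [h1, if_false]
    rw [sorted_bool_partition, okCount_eq, List.foldl_append]
    rw [List.append_assoc, List.singleton_append, join_eq_foldl]
    rw [List.foldl_append, List.foldl_map, List.foldl_map, List.foldl_map, List.foldl_map, List.length_map]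
    have hok : ∀ (b : String),
        List.foldl (fun (x : String) (y : Bool × String) => x ++ "\n" ++ ("  OK: " ++ y.2)) b
            (results.filter (fun r => r.1)) =
          List.foldl (fun out r => out ++ if r.1 = true then "\n  OK: " ++ r.2 else "\n  FAILED: " ++ r.2) b
            (results.filter (fun r => r.1)) := by
      intro b
      apply PySem.List.foldl_congr_mem
      intro acc r hr
      have hr1 : r.1 = true := by simpa using (List.mem_filter.1 hr).2
      rw [hr1, if_pos rfl, String.append_assoc, prefix_ok r.2]
    have hfail : ∀ (b : String),
        List.foldl (fun (x : String) (y : Bool × String) => x ++ "\n" ++ ("  FAILED: " ++ y.2)) b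
            (results.filter (fun r => !r.1)) =
          List.foldl (fun out r => out ++ if r.1 = true then "\n  OK: " ++ r.2 else "\n  FAILED: " ++ r.2) b
            (results.filter (fun r => !r.1)) := by
      intro b
      apply PySem.List.foldl_congr_mem
      intro acc r hr
      have hr1 : r.1 = false := by simpa using (List.mem_filter.1 hr).2
      rw [hr1, if_neg (by simp), String.append_assoc, prefix_failed r.2]
    rw [hok, hfail]
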